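-- pv_equiv track=rewrite | github.com/KenzKD/Config-Files | Blender/4.0/scripts/addons/blenderkit/paths.py | get_res_file
-- ===== SOURCE A (Python) =====
-- resolutions = {
--     "resolution_0_5K": 512,
--     "resolution_1K": 1024,
--     "resolution_2K": 2048,
--     "resolution_4K": 4096,
--     "resolution_8K": 8192,
-- }
--
-- def get_res_file(asset_data, resolution, find_closest_with_url=False):
--     """
--     Returns closest resolution that current asset can offer.
--     If there are no resolutions, return orig file.
--     If orig file is requested, return it.
--     params
--     asset_data
--     resolution - ideal resolution
--     find_closest_with_url:
--         returns only resolutions that already containt url in the asset data, used in scenes where asset is/was already present.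
--     Returns:
--         resolution file
--         resolution, so that other processess can pass correctly which resolution is downloaded.
--     """
--     orig = None
--     res = None
--     closest = None
--     target_resolution = resolutions.get(resolution)
--     mindist = 100000000
--
--     for f in asset_data["files"]:
--         if f["fileType"] == "blend":
--             orig = f
--             if resolution == "blend":
--                 # orig file found, return.
--                 return orig, "blend"
--
--         if f["fileType"] == resolution:
--             # exact match found, return.
--             return f, resolution
--         # find closest resolution if the exact match won't be found.
--         rval = resolutions.get(f["fileType"])
--         if rval and target_resolution:
--             rdiff = abs(target_resolution - rval)
--             if rdiff < mindist:
--                 closest = f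
--                 mindist = rdiff
--     if not res and not closest:
--         return orig, "blend"
--     return closest, closest["fileType"]
-- ===== SOURCE B (Python) =====
-- resolutions = {
--     "resolution_0_5K": 512,
--     "resolution_1K": 1024,
--     "resolution_2K": 2048,
--     "resolution_4K": 4096,
--     "resolution_8K": 8192,
-- }
--
-- def get_res_file(asset_data, resolution, find_closest_with_url=False):
--     files = asset_data["files"]
--     if resolution == "blend":
--         return next((f for f in files if f["fileType"] == "blend"), None), "blend"
--     exact = next((f for f in files if f["fileType"] == resolution), None)
--     if exact is not None:
--         return exact, resolution
--     target = resolutions.get(resolution)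
--     if target is not None:
--         candidates = [f for f in files if f["fileType"] in resolutions]
--         if candidates:
--             closest = min(candidates, key=lambda f: abs(target - resolutions[f["fileType"]]))
--             return closest, closest["fileType"]
--     # fall back to the original .blend file (the last one, as the loop in A keeps overwriting)
--     orig = next((f for f in reversed(files) if f["fileType"] == "blend"), None)
--     return orig, "blend"
-- ===== Notes on version B (the rewrite author's own statement) =====
-- stated objective: simpler
-- what changed: A's single fused loop with orig/closest/mindist accumulators and early returns is replaced by separate targeted passes: find? for the orig-blend and exact-match cases, filter + min(key=...) for the closest-resolution case, and a reversed find? for the last-blend fallback.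
import Mathlib
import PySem

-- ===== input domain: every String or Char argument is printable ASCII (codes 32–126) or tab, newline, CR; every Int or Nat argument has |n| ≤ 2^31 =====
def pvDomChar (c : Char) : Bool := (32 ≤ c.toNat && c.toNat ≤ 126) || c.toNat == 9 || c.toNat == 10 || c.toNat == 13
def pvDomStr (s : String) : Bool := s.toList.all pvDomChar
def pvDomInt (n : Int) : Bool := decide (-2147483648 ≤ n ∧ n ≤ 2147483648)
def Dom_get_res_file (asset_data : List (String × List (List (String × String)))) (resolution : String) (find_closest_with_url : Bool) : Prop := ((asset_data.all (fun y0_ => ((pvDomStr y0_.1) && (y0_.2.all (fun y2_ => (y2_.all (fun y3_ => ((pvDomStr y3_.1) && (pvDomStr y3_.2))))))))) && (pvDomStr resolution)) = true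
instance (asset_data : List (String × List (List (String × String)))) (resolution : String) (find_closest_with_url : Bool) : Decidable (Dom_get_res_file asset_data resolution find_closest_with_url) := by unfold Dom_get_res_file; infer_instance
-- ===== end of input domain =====

-- B replaces A's fused single loop (orig/closest/mindist accumulators with early returns) by
-- separate targeted passes: find? for the blend/exact cases, filter + min for the closest case,
-- reversed find? for the fallback (objective: simpler; same O(n) cost).

-- ===== PORT A =====
-- the module-level `resolutions` dict
def pvRES : PySem.Dict String Int :=
  PySem.Dict.mk [("resolution_0_5K", 512), ("resolution_1K", 1024), ("resolution_2K", 2048),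
                 ("resolution_4K", 4096), ("resolution_8K", 8192)]

-- f["fileType"]; the default "" is only reached where Python raises KeyError (outside Pre_)
def pvFt (f : List (String × String)) : String := ((PySem.Dict.mk f).get? "fileType").getD ""

-- A's for-loop over asset_data["files"], state (orig, closest, mindist); early returns are the
-- non-recursive branches.  Python's final `not closest` also treats an EMPTY dict as falsy, but
-- closest is only ever set to a file whose fileType is a key of `resolutions`, hence non-empty,
-- so the plain none/some match is exact.
def pvLoopA (resolution : String) (target : Option Int) :
    List (List (String × String)) → Option (List (String × String)) →
    Option (List (String × String)) → Int → (Option (List (String × String))) × String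
  | [], orig, closest, _ =>
    match closest with
    | none => (orig, "blend")
    | some c => (some c, pvFt c)
  | f :: rest, orig, closest, mindist =>
    let ft := pvFt f
    let orig' := if ft == "blend" then some f else orig
    if ft == "blend" && resolution == "blend" then (some f, "blend")
    else if ft == resolution then (some f, resolution)
    else
      match pvRES.get? ft, target with
      | some rval, some t =>
        -- `if rval and target_resolution:` — Python truthiness on the two ints
        if rval != 0 && t != 0 then
          if |t - rval| < mindist then pvLoopA resolution target rest orig' (some f) (|t - rval|)
          else pvLoopA resolution target rest orig' closest mindist
        else pvLoopA resolution target rest orig' closest mindist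
      | _, _ => pvLoopA resolution target rest orig' closest mindist

def get_res_file (asset_data : List (String × List (List (String × String)))) (resolution : String) (find_closest_with_url : Bool) : (Option (List (String × String))) × String :=
  let files := ((PySem.Dict.mk asset_data).get? "files").getD []
  pvLoopA resolution (pvRES.get? resolution) files none none 100000000

-- ===== PORT B =====
def pvRval (f : List (String × String)) : Option Int := pvRES.get? (pvFt f)

-- Source B's min key: abs(target - resolutions[f["fileType"]]) (default unreached on candidates)
def pvKey (t : Int) (f : List (String × String)) : Int := |t - (pvRval f).getD 0|

def get_res_file_alt (asset_data : List (String × List (List (String × String)))) (resolution : String) (find_closest_with_url : Bool) : (Option (List (String × String))) × String :=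
  let files := ((PySem.Dict.mk asset_data).get? "files").getD []
  if resolution == "blend" then
    (files.find? (fun f => pvFt f == "blend"), "blend")
  else
    match files.find? (fun f => pvFt f == resolution) with
    | some f => (some f, resolution)
    | none =>
      match pvRES.get? resolution with
      | some t =>
        match PySem.List.min? (files.filter (fun f => (pvRval f).isSome)) (pvKey t) with
        | some c => (some c, pvFt c)
        | none => (files.reverse.find? (fun f => pvFt f == "blend"), "blend")
      | none => (files.reverse.find? (fun f => pvFt f == "blend"), "blend")

-- ===== PRECONDITION & SPEC =====
def pvHasFT (f : List (String × String)) : Bool := (PySem.Dict.mk f).contains "fileType"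

-- Exactly where Python A returns: asset_data has a "files" key (else KeyError), and either every
-- file has a "fileType" key, or an exact-match early return fires strictly before the first file
-- that lacks one (else KeyError at that file).
def Pre_get_res_file (asset_data : List (String × List (List (String × String)))) (resolution : String) (find_closest_with_url : Bool) : Prop :=
  (PySem.Dict.mk asset_data).contains "files" = true ∧
  (((((PySem.Dict.mk asset_data).get? "files").getD []).all pvHasFT = true) ∨
   (((((PySem.Dict.mk asset_data).get? "files").getD []).takeWhile pvHasFT).any
      (fun f => pvFt f == resolution) = true))
instance (asset_data : List (String × List (List (String × String)))) (resolution : String) (find_closest_with_url : Bool) : Decidable (Pre_get_res_file asset_data resolution find_closest_with_url) := by unfold Pre_get_res_file; infer_instance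

def pvWitness_get_res_file : (List (String × List (List (String × String)))) × String × Bool :=
  ([("files", [[("fileType", "resolution_1K")], [("fileType", "blend")]])], "resolution_2K", false)

def Spec_get_res_file (asset_data : List (String × List (List (String × String)))) (resolution : String) (find_closest_with_url : Bool) (out : (Option (List (String × String))) × String) : Prop := out = get_res_file_alt asset_data resolution find_closest_with_url
instance (asset_data : List (String × List (List (String × String)))) (resolution : String) (find_closest_with_url : Bool) (out : (Option (List (String × String))) × String) : Decidable (Spec_get_res_file asset_data resolution find_closest_with_url out) := by unfold Spec_get_res_file; infer_instance

-- ===== CLAIM (what is proved, stated in full; the proofs are below) =====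
def Claim_equal_get_res_file : Prop := ∀ (asset_data : List (String × List (List (String × String)))) (resolution : String) (find_closest_with_url : Bool), Dom_get_res_file asset_data resolution find_closest_with_url → Pre_get_res_file asset_data resolution find_closest_with_url → Spec_get_res_file asset_data resolution find_closest_with_url (get_res_file asset_data resolution find_closest_with_url)

-- ===== LEMMAS AND PROOFS =====

-- proof-only helpers: A's closest/mindist update as a fold step
def pvCand (target : Option Int) (f : List (String × String)) : Bool :=
  match target, pvRval f with
  | some t, some r => r != 0 && t != 0
  | _, _ => false

def pvKeyT (target : Option Int) (f : List (String × String)) : Int :=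
  match target with
  | some t => pvKey t f
  | none => 0

def pvStep (target : Option Int)
    (acc : Option (List (String × String)) × Int) (f : List (String × String)) :
    Option (List (String × String)) × Int :=
  if pvCand target f && decide (pvKeyT target f < acc.2) then (some f, pvKeyT target f) else acc

def pvLastBlend (l : List (List (String × String))) (orig : Option (List (String × String))) :
    Option (List (String × String)) :=
  match l.reverse.find? (fun f => pvFt f == "blend") with
  | some f => some f
  | none => orig

lemma pvRES_bound (s : String) (v : Int) (h : pvRES.get? s = some v) : 512 ≤ v ∧ v ≤ 8192 := by
  simp only [pvRES, PySem.Dict.get?_mk_cons] at h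
  split_ifs at h <;> simp_all [PySem.Dict.get?] <;> omega

lemma pvLoopA_blend (l : List (List (String × String))) :
    ∀ (orig : Option (List (String × String))) (m : Int),
    pvLoopA "blend" none l orig none m =
      (match l.find? (fun f => pvFt f == "blend") with
       | some f => (some f, "blend")
       | none => (orig, "blend")) := by
  induction l with
  | nil => intro orig m; simp [pvLoopA]
  | cons f rest ih =>
    intro orig m
    by_cases hf : pvFt f == "blend"
    · simp [pvLoopA, hf, List.find?]
    · have hstep : pvLoopA "blend" none (f :: rest) orig none m
          = pvLoopA "blend" none rest orig none m := by
        cases hR : pvRES.get? (pvFt f) <;> simp [pvLoopA, hf, hR]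
      rw [hstep, ih, List.find?_cons_of_neg (by simp [hf])]

lemma pv_min?_go {α : Type} (key : α → Int) (xs : List α) :
    ∀ (x : α),
    List.foldl (fun acc y => match acc with
      | none => some y
      | some m => if key y < key m then some y else some m) (some x) xs
    = some (match PySem.List.min? xs key with
            | none => x
            | some w => if key w < key x then w else x) := by
  induction xs with
  | nil => intro x; simp [PySem.List.min?]
  | cons y ys ih =>
    intro x
    have hmin : PySem.List.min? (y :: ys) key =
        some (match PySem.List.min? ys key with
              | none => y
              | some w => if key w < key y then w else y) := ih y
    rw [List.foldl_cons]
    by_cases h1 : key y < key x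
    · have hred : (match (some x : Option α) with
          | none => some y
          | some m => if key y < key m then some y else some m) = some y := by simp [h1]
      rw [hred, ih y, hmin]
      cases hm : PySem.List.min? ys key with
      | none => simp [h1]
      | some w =>
        by_cases h2 : key w < key y <;> by_cases h3 : key w < key x <;>
          simp [h1, h2, h3] <;> omega
    · have hred : (match (some x : Option α) with
          | none => some y
          | some m => if key y < key m then some y else some m) = some x := by simp [h1]
      rw [hred, ih x, hmin]
      cases hm : PySem.List.min? ys key with
      | none => simp [h1]
      | some w =>
        by_cases h2 : key w < key y <;> by_cases h3 : key w < key x <;>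
          simp [h1, h2, h3] <;> omega

lemma pv_min?_cons {α : Type} (key : α → Int) (x : α) (xs : List α) :
    PySem.List.min? (x :: xs) key =
      some (match PySem.List.min? xs key with
            | none => x
            | some w => if key w < key x then w else x) := by
  simp only [PySem.List.min?, List.foldl_cons]
  exact pv_min?_go key xs x

lemma pv_fold_min (target : Option Int) (l : List (List (String × String))) :
    ∀ (c : Option (List (String × String))) (m : Int),
    List.foldl (pvStep target) (c, m) l =
      match PySem.List.min? (l.filter (pvCand target)) (pvKeyT target) with
      | none => (c, m)
      | some w => if pvKeyT target w < m then (some w, pvKeyT target w) else (c, m) := by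
  induction l with
  | nil => intro c m; simp [PySem.List.min?]
  | cons f rest ih =>
    intro c m
    by_cases hc : pvCand target f
    · rw [List.foldl_cons]
      rw [List.filter_cons_of_pos hc, pv_min?_cons]
      by_cases hk : pvKeyT target f < m
      · have hstep : pvStep target (c, m) f = (some f, pvKeyT target f) := by
          simp [pvStep, hc, hk]
        rw [hstep, ih]
        cases hm : PySem.List.min? (rest.filter (pvCand target)) (pvKeyT target) with
        | none => simp [hk]
        | some w =>
          by_cases h2 : pvKeyT target w < pvKeyT target f <;> simp [h2, hk] <;> omega
      · have hstep : pvStep target (c, m) f = (c, m) := by simp [pvStep, hk]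
        rw [hstep, ih]
        cases hm : PySem.List.min? (rest.filter (pvCand target)) (pvKeyT target) with
        | none => simp [hk]
        | some w =>
          by_cases h2 : pvKeyT target w < pvKeyT target f <;> simp [h2, hk] <;> omega
    · rw [List.foldl_cons]
      have hstep : pvStep target (c, m) f = (c, m) := by simp [pvStep, hc]
      rw [hstep, ih, List.filter_cons_of_neg (by simp [hc])]

lemma pvLastBlend_cons (f : List (String × String)) (l : List (List (String × String)))
    (orig : Option (List (String × String))) :
    pvLastBlend (f :: l) orig =
      pvLastBlend l (if pvFt f == "blend" then some f else orig) := by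
  simp only [pvLastBlend, List.reverse_cons, List.find?_append]
  cases hl : l.reverse.find? (fun f => pvFt f == "blend") with
  | some g => simp
  | none =>
    by_cases hf : pvFt f == "blend" <;> simp [List.find?, hf]

lemma pvLoopA_spec (resolution : String) (target : Option Int)
    (hr : resolution ≠ "blend") (l : List (List (String × String))) :
    ∀ (orig c : Option (List (String × String))) (m : Int),
    pvLoopA resolution target l orig c m =
      match l.find? (fun f => pvFt f == resolution) with
      | some f => (some f, resolution)
      | none =>
        match (List.foldl (pvStep target) (c, m) l).1 with
        | some w => (some w, pvFt w)
        | none => (pvLastBlend l orig, "blend") := by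
  induction l with
  | nil =>
    intro orig c m
    cases c <;> simp [pvLoopA, pvLastBlend]
  | cons f rest ih =>
    intro orig c m
    have hrb : (resolution == "blend") = false := by
      simp [hr]
    by_cases hf : pvFt f == resolution
    · have hfb : (pvFt f == "blend") = false := by
        have : pvFt f = resolution := by simpa using hf
        simp [this, hr]
      simp [pvLoopA, hf, hfb, List.find?]
    · rw [List.find?_cons_of_neg (by simp [hf])]
      have hfold : List.foldl (pvStep target) (c, m) (f :: rest)
          = List.foldl (pvStep target) (pvStep target (c, m) f) rest := by
        simp
      rw [hfold, pvLastBlend_cons]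
      have hmain : pvLoopA resolution target (f :: rest) orig c m =
          pvLoopA resolution target rest (if pvFt f == "blend" then some f else orig)
            (pvStep target (c, m) f).1 (pvStep target (c, m) f).2 := by
        cases htg : target with
        | none => cases hR : pvRES.get? (pvFt f) <;>
            simp [pvLoopA, pvStep, pvCand, pvRval, hf, hrb, hR]
        | some t =>
          cases hR : pvRES.get? (pvFt f) with
          | none => simp [pvLoopA, pvStep, pvCand, pvRval, hf, hrb, hR]
          | some r =>
            by_cases hnz : (r != 0 && t != 0) = true
            · by_cases hk : |t - r| < m
              · simp [pvLoopA, pvStep, pvCand, pvKeyT, pvKey, pvRval, hf, hrb, hR, hnz, hk]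
              · simp [pvLoopA, pvStep, pvCand, pvKeyT, pvKey, pvRval, hf, hrb, hR, hnz, hk]
            · simp [pvLoopA, pvStep, pvCand, pvKeyT, pvKey, pvRval, hf, hrb, hR, hnz]
      rw [hmain, ih]

-- ===== VERDICT (by name: the statement is the Claim_ definition above) =====
theorem get_res_file_spec : Claim_equal_get_res_file := by
  intro asset_data resolution fcu _hdom _hpre
  unfold Spec_get_res_file get_res_file get_res_file_alt
  by_cases hb : resolution = "blend"
  · subst hb
    have ht : pvRES.get? "blend" = none := by decide
    rw [ht, pvLoopA_blend]
    simp only [BEq.rfl, if_pos]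
    cases hfind : (((PySem.Dict.mk asset_data).get? "files").getD []).find?
        (fun f => pvFt f == "blend") <;> simp [hfind]
  · have hrb : (resolution == "blend") = false := by simp [hb]
    rw [pvLoopA_spec resolution _ hb]
    simp only [hrb, Bool.false_eq_true, if_false]
    cases hfind : (((PySem.Dict.mk asset_data).get? "files").getD []).find?
        (fun f => pvFt f == resolution) with
    | some f => simp [hfind]
    | none =>
      simp only [hfind]
      cases ht : pvRES.get? resolution with
      | none =>
        have hfold : List.foldl (pvStep none)
            ((none : Option (List (String × String))), (100000000 : Int))
            (((PySem.Dict.mk asset_data).get? "files").getD []) = (none, 100000000) := by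
          rw [pv_fold_min]
          have hnil : (((PySem.Dict.mk asset_data).get? "files").getD []).filter (pvCand none) = [] := by
            apply List.filter_eq_nil_iff.mpr; intro f _; simp [pvCand]
          rw [hnil]; simp [PySem.List.min?]
        rw [hfold]
        cases hlb : (((PySem.Dict.mk asset_data).get? "files").getD []).reverse.find?
            (fun f => pvFt f == "blend") <;> simp [pvLastBlend, hlb]
      | some t =>
        have hb2 := pvRES_bound _ _ ht
        have hfilter : (((PySem.Dict.mk asset_data).get? "files").getD []).filter (pvCand (some t))
            = (((PySem.Dict.mk asset_data).get? "files").getD []).filter (fun f => (pvRval f).isSome) := by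
          apply List.filter_congr; intro f _
          cases hR : pvRval f with
          | none => simp [pvCand, hR]
          | some r =>
            have hb1 := pvRES_bound _ _ (show pvRES.get? (pvFt f) = some r from hR)
            simp only [pvCand, hR, Option.isSome_some]
            simp; omega
        have hkey : pvKeyT (some t) = pvKey t := rfl
        rw [pv_fold_min, hfilter, hkey]
        cases hm : PySem.List.min?
            ((((PySem.Dict.mk asset_data).get? "files").getD []).filter (fun f => (pvRval f).isSome))
            (pvKey t) with
        | none =>
          simp only [hm]
          cases hlb : (((PySem.Dict.mk asset_data).get? "files").getD []).reverse.find?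
              (fun f => pvFt f == "blend") <;> simp [pvLastBlend, hlb]
        | some w =>
          have hwmem := PySem.List.min?_mem hm
          have hwf := (List.mem_filter.mp hwmem).2
          obtain ⟨r, hr⟩ := Option.isSome_iff_exists.mp hwf
          have hb1 := pvRES_bound _ _ (show pvRES.get? (pvFt w) = some r from hr)
          have hkw : pvKey t w < 100000000 := by
            simp only [pvKey, hr, Option.getD_some]
            rw [abs_lt]; omega
          simp [hm, hkw]
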